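-- pv_equiv track=rewrite | github.com/leo-1508/cp1404practicals | prac_05/wimbledon.py | count_wimbledon_champions
-- ===== SOURCE A (Python) =====
-- def count_wimbledon_champions(data):
--
--     champion_counts = {}
--     for item in data:
--         winner_name = item[1]
--         if winner_name in champion_counts:
--             champion_counts[winner_name] += 1
--         else:
--             champion_counts[winner_name] = 1
--     return champion_counts
-- ===== SOURCE B (Python) =====
-- def count_wimbledon_champions(data):
--     names = [item[1] for item in data]
--     return {name: names.count(name) for name in dict.fromkeys(names)}
-- ===== Notes on version B (the rewrite author's own statement) =====
-- stated objective: alternative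
-- what changed: Replaces A's single accumulating dict pass with a list of names, an ordered dedup (dict.fromkeys) of the distinct names, and one counting scan per distinct name.
import Mathlib
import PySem

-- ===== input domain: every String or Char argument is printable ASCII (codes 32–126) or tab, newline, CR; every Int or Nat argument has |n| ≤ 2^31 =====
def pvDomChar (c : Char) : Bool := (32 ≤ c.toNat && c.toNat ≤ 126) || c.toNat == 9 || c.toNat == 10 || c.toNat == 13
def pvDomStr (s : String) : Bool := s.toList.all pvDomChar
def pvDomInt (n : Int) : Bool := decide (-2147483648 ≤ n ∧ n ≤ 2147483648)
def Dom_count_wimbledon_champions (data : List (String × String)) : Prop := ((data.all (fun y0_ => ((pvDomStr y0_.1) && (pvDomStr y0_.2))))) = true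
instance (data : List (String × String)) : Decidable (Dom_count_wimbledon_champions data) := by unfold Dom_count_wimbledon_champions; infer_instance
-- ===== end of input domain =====

-- B replaces A's single accumulating dict pass by an ordered dedup of the winner names plus one count scan per distinct name (objective: alternative decomposition).


-- ===== PORT A =====
-- Faithful port of A: one accumulating pass over data through an insertion-ordered dict.
def count_wimbledon_champions (data : List (String × String)) : List (String × Int) :=
  (data.foldl
    (fun d item =>
      let winner_name := item.2
      if d.contains winner_name then
        d.insert winner_name (d.getD winner_name 0 + 1)
      else
        d.insert winner_name 1)
    (PySem.Dict.empty : PySem.Dict String Int)).items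

-- ===== PORT B =====
-- Faithful port of B: names list, ordered dedup (dict.fromkeys), one names.count per distinct name.
def count_wimbledon_champions_alt (data : List (String × String)) : List (String × Int) :=
  let names := data.map (fun item => item.2)
  (PySem.List.dedup names).map (fun name => (name, (names.count name : Int)))

-- ===== PRECONDITION & SPEC =====
def Spec_count_wimbledon_champions (data : List (String × String)) (out : List (String × Int)) : Prop := out = count_wimbledon_champions_alt data
instance (data : List (String × String)) (out : List (String × Int)) : Decidable (Spec_count_wimbledon_champions data out) := by unfold Spec_count_wimbledon_champions; infer_instance

-- ===== CLAIM (what is proved, stated in full; the proofs are below) =====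
def Claim_equal_count_wimbledon_champions : Prop := ∀ (data : List (String × String)), Dom_count_wimbledon_champions data → Spec_count_wimbledon_champions data (count_wimbledon_champions data)

-- ===== LEMMAS AND PROOFS =====

-- ===== VERDICT (by name: the statement is the Claim_ definition above) =====
theorem step_eq (d : PySem.Dict String Int) (item : String × String) :
    (let winner_name := item.2;
     if d.contains winner_name then
       d.insert winner_name (d.getD winner_name 0 + 1)
     else
       d.insert winner_name 1)
    = d.insert item.2 (d.getD item.2 0 + 1) := by
  by_cases h : d.contains item.2
  · simp [h]
  · have h' : d.contains item.2 = false := by simpa using h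
    rw [PySem.Dict.getD_of_not_contains (h := h')]
    simp [h']

theorem foldl_step_eq (l : List (String × String)) (d : PySem.Dict String Int) :
    l.foldl
      (fun d item =>
        let winner_name := item.2
        if d.contains winner_name then
          d.insert winner_name (d.getD winner_name 0 + 1)
        else
          d.insert winner_name 1) d
    = l.foldl (fun d item => d.insert item.2 (d.getD item.2 0 + 1)) d := by
  induction l generalizing d with
  | nil => rfl
  | cons a t ih => simp only [List.foldl_cons, step_eq, ih]

theorem count_wimbledon_champions_spec : Claim_equal_count_wimbledon_champions := by
  intro data _
  unfold Spec_count_wimbledon_champions count_wimbledon_champions count_wimbledon_champions_alt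
  have hf : data.foldl
      (fun d item =>
        let winner_name := item.2
        if d.contains winner_name then
          d.insert winner_name (d.getD winner_name 0 + 1)
        else
          d.insert winner_name 1)
      (PySem.Dict.empty : PySem.Dict String Int)
      = (data.map (fun item => item.2)).foldl
          (fun d x => d.insert x (d.getD x 0 + 1)) PySem.Dict.empty := by
    rw [foldl_step_eq, List.foldl_map]
  rw [hf, PySem.Dict.foldl_insert_getD_add_one_eq_counter, PySem.Dict.items_counter]
  simp [PySem.List.dedup_eq_ofList]
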